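-- pv_equiv track=rewrite | github.com/renowator/A01-Ag-sim-for-autonomous-agents | ag_sim/agents.py | prioritizeQueue
-- ===== SOURCE A (Python) =====
-- def prioritizeQueue(queue, element):
--     check = 0
--     while check == 0:
--         length = len(queue)
--         if length == 0:
--             queue.insert(0, element)
--             break
--         else:
--             while length >= 0:
--                 length -= 1
--                 if element[0] > queue[length][0]:
--                     queue.insert(length+1, element)
--                     check = 1
--                     break
--
--         if check == 0:
--             queue.insert(0, element)
--             break
--
--     return queue
-- ===== SOURCE B (Python) =====
-- def prioritizeQueue(queue, element):
--     pos = 0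
--     for i, item in enumerate(queue):
--         if element[0] > item[0]:
--             pos = i + 1
--     queue.insert(pos, element)
--     return queue
-- ===== Notes on version B (the rewrite author's own statement) =====
-- stated objective: simpler
-- what changed: Replaced A's nested while loops with flag variable and backward scan (including a redundant negative-index check) by a single forward pass that records the position after the last strictly-smaller-priority element, then one insert.
import Mathlib
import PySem

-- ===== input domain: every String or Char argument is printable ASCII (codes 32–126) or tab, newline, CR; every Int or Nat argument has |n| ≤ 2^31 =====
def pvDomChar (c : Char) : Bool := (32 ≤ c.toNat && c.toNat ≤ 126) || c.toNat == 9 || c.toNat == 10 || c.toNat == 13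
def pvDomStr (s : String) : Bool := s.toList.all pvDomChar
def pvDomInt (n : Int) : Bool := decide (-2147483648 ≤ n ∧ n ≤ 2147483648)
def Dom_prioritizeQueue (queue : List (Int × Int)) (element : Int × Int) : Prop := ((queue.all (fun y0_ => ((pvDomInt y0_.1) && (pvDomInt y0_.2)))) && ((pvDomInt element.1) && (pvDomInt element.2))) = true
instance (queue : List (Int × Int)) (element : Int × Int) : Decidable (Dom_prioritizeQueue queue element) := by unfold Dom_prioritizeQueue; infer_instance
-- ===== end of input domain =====

-- B replaces A's backward scan with flag variable by one forward pass keeping the last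
-- insertion position (objective: simpler). Both A and B mutate `queue` in place in Python
-- (one insert); the equivalence proved here is about the returned list.

-- ===== PORT A =====
-- inner 'while length >= 0' loop of A; fuel bounds the iterations (len+2 suffices);
-- `some r` = inserted and set check=1, `none` = loop fell through with check still 0.
def pqInnerA (queue : List (Int × Int)) (element : Int × Int) : Int → Nat → Option (List (Int × Int))
  | _, 0 => none
  | length, fuel+1 =>
    if length ≥ 0 then
      match PySem.List.pyGet? queue (length - 1) with
      | some q =>
        if element.1 > q.1 then some (PySem.List.insert queue ((length - 1) + 1) element)
        else pqInnerA queue element (length - 1) fuel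
      | none => none      -- IndexError: unreachable for the calls A makes
    else none

def prioritizeQueue (queue : List (Int × Int)) (element : Int × Int) : List (Int × Int) :=
  if (queue.length : Int) = 0 then PySem.List.insert queue 0 element
  else
    match pqInnerA queue element (queue.length : Int) (queue.length + 2) with
    | some r => r
    | none => PySem.List.insert queue 0 element    -- check == 0 after the inner loop

-- ===== PORT B =====
def prioritizeQueue_alt (queue : List (Int × Int)) (element : Int × Int) : List (Int × Int) :=
  let pos := (PySem.List.enumerate queue 0).foldl
    (fun pos p => if element.1 > p.2.1 then p.1 + 1 else pos) 0
  PySem.List.insert queue pos element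

-- ===== PRECONDITION & SPEC =====
def Spec_prioritizeQueue (queue : List (Int × Int)) (element : Int × Int) (out : List (Int × Int)) : Prop := out = prioritizeQueue_alt queue element
instance (queue : List (Int × Int)) (element : Int × Int) (out : List (Int × Int)) : Decidable (Spec_prioritizeQueue queue element out) := by unfold Spec_prioritizeQueue; infer_instance

-- ===== CLAIM (what is proved, stated in full; the proofs are below) =====
def Claim_equal_prioritizeQueue : Prop := ∀ (queue : List (Int × Int)) (element : Int × Int), Dom_prioritizeQueue queue element → Spec_prioritizeQueue queue element (prioritizeQueue queue element)

-- ===== LEMMAS AND PROOFS =====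

-- B's fold over the first n elements of the queue
def pqPos (element : Int × Int) (l : List (Int × Int)) (s init : Int) : Int :=
  (PySem.List.enumerate l s).foldl (fun pos p => if element.1 > p.2.1 then p.1 + 1 else pos) init

lemma pqPos_nil (element : Int × Int) (s init : Int) : pqPos element [] s init = init := by
  simp [pqPos, PySem.List.enumerate]

lemma pqPos_append_singleton (element : Int × Int) (l : List (Int × Int)) (x : Int × Int)
    (s init : Int) :
    pqPos element (l ++ [x]) s init =
      if element.1 > x.1 then s + l.length + 1 else pqPos element l s init := by
  simp [pqPos, PySem.List.enumerate_append, List.foldl_append, PySem.List.enumerate]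

lemma pqInnerA_succ (queue : List (Int × Int)) (element : Int × Int) (length : Int) (fuel : Nat) :
    pqInnerA queue element length (fuel + 1) =
      if length ≥ 0 then
        match PySem.List.pyGet? queue (length - 1) with
        | some q =>
          if element.1 > q.1 then some (PySem.List.insert queue ((length - 1) + 1) element)
          else pqInnerA queue element (length - 1) fuel
        | none => none
      else none := rfl

lemma pqInnerA_eq (queue : List (Int × Int)) (element : Int × Int)
    (hne : queue ≠ []) (hlast : ¬ element.1 > (queue.getLast hne).1) :
    ∀ (n : Nat) (fuel : Nat), n ≤ queue.length → n + 2 ≤ fuel →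
      pqInnerA queue element (n : Int) fuel =
        (if pqPos element (queue.take n) 0 0 = 0 then none
         else some (PySem.List.insert queue (pqPos element (queue.take n) 0 0) element)) := by
  intro n
  induction n with
  | zero =>
    intro fuel _ hfuel
    obtain ⟨f, rfl⟩ : ∃ f, fuel = f + 2 := ⟨fuel - 2, by omega⟩
    simp only [pqInnerA, Nat.cast_zero]
    rw [if_pos (by omega)]
    have : PySem.List.pyGet? queue ((0:Int) - 1) = some (queue.getLast hne) := by
      rw [show (0:Int) - 1 = -1 by ring, PySem.List.pyGet?_neg_one,
        List.getLast?_eq_getLast_of_ne_nil hne]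
    rw [this]
    dsimp only
    rw [if_neg hlast]
    simp [pqPos_nil]
  | succ n ih =>
    intro fuel hn hfuel
    obtain ⟨f, rfl⟩ : ∃ f, fuel = f + 1 := ⟨fuel - 1, by omega⟩
    have hlt : n < queue.length := by omega
    simp only [pqInnerA]
    rw [if_pos (by push_cast; omega)]
    rw [show ((((n:Nat)+1 : Nat)) : Int) - 1 = ((n:Nat) : Int) by push_cast; ring]
    rw [PySem.List.pyGet?_natCast]
    rw [List.getElem?_eq_getElem hlt]
    dsimp only
    have htake : queue.take (n+1) = queue.take n ++ [queue[n]] := by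
      rw [List.take_add_one, List.getElem?_eq_getElem hlt]; rfl
    rw [htake, pqPos_append_singleton]
    have hlen : ((queue.take n).length : Int) = (n : Int) := by
      simp [List.length_take, Nat.min_eq_left (le_of_lt hlt)]
    by_cases hc : element.1 > queue[n].1
    · rw [if_pos hc, if_pos hc, hlen]
      rw [if_neg (by omega)]
      norm_num
    · rw [if_neg hc, if_neg hc]
      rw [ih f (by omega) (by omega)]

-- ===== VERDICT (by name: the statement is the Claim_ definition above) =====
theorem prioritizeQueue_spec : Claim_equal_prioritizeQueue := by
  intro queue element _
  unfold Spec_prioritizeQueue prioritizeQueue prioritizeQueue_alt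
  by_cases hnil : queue = []
  · subst hnil
    simp [PySem.List.enumerate]
  · have hlen : 0 < queue.length := List.length_pos_of_ne_nil hnil
    rw [if_neg (by exact_mod_cast Nat.pos_iff_ne_zero.mp hlen)]
    have hPos : (PySem.List.enumerate queue 0).foldl
        (fun pos p => if element.1 > p.2.1 then p.1 + 1 else pos) 0 =
        pqPos element queue 0 0 := rfl
    have hsplit : queue = queue.dropLast ++ [queue.getLast hnil] :=
      (List.dropLast_append_getLast hnil).symm
    have hdl : queue.dropLast.length = queue.length - 1 := List.length_dropLast
    by_cases hlast : element.1 > (queue.getLast hnil).1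
    · -- first inner iteration fires at the last index
      rw [show queue.length + 2 = (queue.length + 1) + 1 from rfl, pqInnerA_succ]
      rw [if_pos (by positivity)]
      have hidx : PySem.List.pyGet? queue ((queue.length : Int) - 1) = some (queue.getLast hnil) := by
        rw [show ((queue.length : Int)) - 1 = ((queue.length - 1 : Nat) : Int) by omega,
          PySem.List.pyGet?_natCast, List.getElem?_eq_getElem (by omega)]
        congr 1
        exact (List.getLast_eq_getElem hnil).symm
      rw [hidx]
      dsimp only
      rw [if_pos hlast]
      dsimp only
      have hq : pqPos element queue 0 0 = (queue.length : Int) := by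
        conv_lhs => rw [hsplit]
        rw [pqPos_append_singleton, if_pos hlast]
        push_cast [hdl]
        omega
      rw [hPos, hq]
      congr 1
      omega
    · -- last index fails; the rest of the scan is pqInnerA at length-1
      rw [show queue.length + 2 = (queue.length + 1) + 1 from rfl, pqInnerA_succ]
      rw [if_pos (by positivity)]
      have hidx : PySem.List.pyGet? queue ((queue.length : Int) - 1) = some (queue.getLast hnil) := by
        rw [show ((queue.length : Int)) - 1 = ((queue.length - 1 : Nat) : Int) by omega,
          PySem.List.pyGet?_natCast, List.getElem?_eq_getElem (by omega)]
        congr 1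
        exact (List.getLast_eq_getElem hnil).symm
      rw [hidx]
      dsimp only
      rw [if_neg hlast]
      rw [show ((queue.length : Int)) - 1 = ((queue.length - 1 : Nat) : Int) by omega]
      rw [pqInnerA_eq queue element hnil hlast (queue.length - 1) (queue.length + 1) (by omega) (by omega)]
      have htail : pqPos element queue 0 0 = pqPos element (queue.take (queue.length - 1)) 0 0 := by
        conv_lhs => rw [hsplit]
        rw [pqPos_append_singleton, if_neg hlast]
        congr 1
        exact List.dropLast_eq_take
      rw [hPos, htail]
      by_cases h0 : pqPos element (queue.take (queue.length - 1)) 0 0 = 0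
      · rw [if_pos h0, h0]
      · rw [if_neg h0]
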